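-- pv_equiv track=rewrite | github.com/PaulJeFi/ramses-chess | uci.py | extract_fen
-- ===== SOURCE A (Python) =====
-- def extract_fen(command) :
--         old_space = 0
--         old_char = ''
--         number = '1234567890'
--         string = ''
--         for char in command :
--             if char != ' ' :
--                 string += char
--                 old_char = char
--                 old_space = 0
--             elif char == ' ' :
--                 if old_space == 0 :
--                     string += char
--                     old_char = char
--                     old_space = 1
--                 elif old_char in number :
--                     return string
--         return string
-- ===== SOURCE B (Python) =====
-- def extract_fen(command):
--     # One pass by index: emit each character; on a space, jump past the whole run.
--     out = []
--     i = 0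
--     n = len(command)
--     while i < n:
--         c = command[i]
--         out.append(c)
--         if c == ' ':
--             while i < n and command[i] == ' ':
--                 i += 1
--         else:
--             i += 1
--     return ''.join(out)
-- ===== Notes on version B (the rewrite author's own statement) =====
-- stated objective: simpler
-- what changed: A's stateful char loop with old_space/old_char flags and a dead early-return branch (old_char is always ' ' when it is tested, never a digit) is replaced by a flagless index pass that emits each character and jumps past a whole run of spaces at once.
import Mathlib
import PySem

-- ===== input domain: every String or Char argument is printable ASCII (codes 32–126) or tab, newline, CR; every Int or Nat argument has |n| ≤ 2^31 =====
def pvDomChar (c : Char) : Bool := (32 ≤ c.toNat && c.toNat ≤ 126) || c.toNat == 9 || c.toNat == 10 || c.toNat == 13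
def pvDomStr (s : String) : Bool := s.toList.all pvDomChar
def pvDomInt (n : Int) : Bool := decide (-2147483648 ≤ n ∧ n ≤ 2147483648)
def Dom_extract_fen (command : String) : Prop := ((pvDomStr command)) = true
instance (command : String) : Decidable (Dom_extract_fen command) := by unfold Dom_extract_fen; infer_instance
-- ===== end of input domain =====

-- B replaces A's flag-driven loop (with a dead early-return branch) by a run-skipping pass; objective: simpler.

-- ===== PORT A =====
-- state: old_space : Int, old_char : List Char (Python one-char string, initially ''), acc = string
def extract_fen_go (cs : List Char) (old_space : Int) (old_char : List Char)
    (number : List Char) (acc : List Char) : List Char :=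
  match cs with
  | [] => acc
  | c :: rest =>
    if c ≠ ' ' then
      extract_fen_go rest 0 [c] number (acc ++ [c])
    else if old_space = 0 then
      extract_fen_go rest 1 [c] number (acc ++ [c])
    else if PySem.Chars.isIn old_char number then
      acc
    else
      extract_fen_go rest old_space old_char number acc

def extract_fen (command : String) : String :=
  String.ofList (extract_fen_go command.toList 0 [] "1234567890".toList [])

-- ===== PORT B =====
-- emit each char; after emitting a space, skip the rest of its run (the inner while loop)
def extract_fen_altGo (cs : List Char) : List Char :=
  match cs with
  | [] => []
  | c :: rest =>
    if c = ' ' then c :: extract_fen_altGo (rest.dropWhile (· == ' '))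
    else c :: extract_fen_altGo rest
termination_by cs.length
decreasing_by
  · exact Nat.lt_succ_of_le (List.length_dropWhile_le _ _)
  · simp

def extract_fen_alt (command : String) : String :=
  String.ofList (extract_fen_altGo command.toList)

-- ===== PRECONDITION & SPEC =====
def Spec_extract_fen (command : String) (out : String) : Prop := out = extract_fen_alt command
instance (command : String) (out : String) : Decidable (Spec_extract_fen command out) := by unfold Spec_extract_fen; infer_instance

-- ===== CLAIM (what is proved, stated in full; the proofs are below) =====
def Claim_equal_extract_fen : Prop := ∀ (command : String), Dom_extract_fen command → Spec_extract_fen command (extract_fen command)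

-- ===== LEMMAS AND PROOFS =====

-- The loop invariant: with old_space = 0 the A-loop appends the collapsed tail; with
-- old_space = 1 (then old_char = [' '], not a digit, so the early return never fires)
-- it appends the collapsed tail after skipping the current space run.
lemma extract_fen_go_spec (cs : List Char) : ∀ (acc oc : List Char),
    extract_fen_go cs 0 oc "1234567890".toList acc = acc ++ extract_fen_altGo cs ∧
    extract_fen_go cs 1 [' '] "1234567890".toList acc
      = acc ++ extract_fen_altGo (cs.dropWhile (· == ' ')) := by
  induction cs with
  | nil => intro acc oc; simp [extract_fen_go, extract_fen_altGo]
  | cons c rest ih =>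
    intro acc oc
    by_cases hc : c = ' '
    · subst hc
      constructor
      · rw [extract_fen_go]
        simp only [ne_eq, not_true_eq_false, if_false]
        rw [(ih (acc ++ [' ']) [' ']).2, extract_fen_altGo]
        simp
      · rw [extract_fen_go]
        have hnot : PySem.Chars.isIn [' '] "1234567890".toList = false := by decide
        simp only [ne_eq, not_true_eq_false, if_false, hnot,
          Bool.false_eq_true, if_false, if_neg (by norm_num : ¬ (1 : Int) = 0)]
        rw [(ih acc [' ']).2]
        simp [List.dropWhile]
    · constructor
      · rw [extract_fen_go]
        simp only [if_pos hc]
        rw [(ih (acc ++ [c]) [c]).1, extract_fen_altGo]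
        simp [hc]
      · rw [extract_fen_go]
        simp only [if_pos hc]
        rw [(ih (acc ++ [c]) [c]).1]
        have : (c :: rest).dropWhile (· == ' ') = c :: rest := by
          simp [hc]
        rw [this, extract_fen_altGo]
        simp [hc]

-- ===== VERDICT (by name: the statement is the Claim_ definition above) =====
theorem extract_fen_spec : Claim_equal_extract_fen := by
  intro command _
  unfold Spec_extract_fen extract_fen extract_fen_alt
  rw [(extract_fen_go_spec command.toList [] []).1]
  simp
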